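-- pv_equiv track=rewrite | github.com/SnocmaG/book-forge | scripts/refresh-versions.py | is_in_dont_section
-- ===== SOURCE A (Python) =====
-- def is_in_dont_section(rule_text, match_pos):
--     """Check if a version reference is inside a **Don't:** example (intentionally old)."""
--     # Look backwards from the match position for **Do:** or **Don't:** markers
--     text_before = rule_text[:match_pos]
--     last_do = text_before.rfind("**Do:**")
--     last_dont = text_before.rfind("**Don't:**")
--     last_wrong = text_before.rfind("*Why wrong:")
--
--     # If the closest preceding marker is Don't or Why wrong, this is an intentional bad example
--     markers = [
--         ("do", last_do),
--         ("dont", last_dont),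
--         ("wrong", last_wrong),
--     ]
--     markers = [(label, pos) for label, pos in markers if pos >= 0]
--     if not markers:
--         return False
--
--     closest = max(markers, key=lambda x: x[1])
--     return closest[0] in ("dont", "wrong")
-- ===== SOURCE B (Python) =====
-- def is_in_dont_section(rule_text, match_pos):
--     """Check if a version reference is inside a **Don't:** example (intentionally old)."""
--     text = rule_text[:match_pos]
--     inside = False
--     for i in range(len(text)):
--         if text.startswith("**Don't:**", i) or text.startswith("*Why wrong:", i):
--             inside = True
--         elif text.startswith("**Do:**", i):
--             inside = False
--     return inside
-- ===== Notes on version B (the rewrite author's own statement) =====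
-- stated objective: alternative
-- what changed: Replaces three independent backward rfind scans plus a filter/max-by-position comparison with one forward scan that keeps a single boolean flag flipped at each marker it passes, returning the flag set by the last marker.
import Mathlib
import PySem

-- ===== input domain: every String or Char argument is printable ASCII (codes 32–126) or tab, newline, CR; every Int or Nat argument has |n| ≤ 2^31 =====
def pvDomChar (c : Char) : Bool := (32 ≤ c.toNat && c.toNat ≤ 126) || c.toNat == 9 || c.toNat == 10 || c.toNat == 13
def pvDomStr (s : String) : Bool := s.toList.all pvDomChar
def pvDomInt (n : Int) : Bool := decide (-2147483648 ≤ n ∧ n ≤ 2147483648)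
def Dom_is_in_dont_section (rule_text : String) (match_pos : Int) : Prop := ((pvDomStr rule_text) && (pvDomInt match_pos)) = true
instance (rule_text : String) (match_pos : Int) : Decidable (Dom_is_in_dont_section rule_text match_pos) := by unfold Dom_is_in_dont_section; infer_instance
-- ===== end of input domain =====

-- B replaces A's three backward rfind scans + max-by-position with one forward scan keeping a boolean flag (alternative decomposition, same cost).


-- ===== PORT A =====
def is_in_dont_section (rule_text : String) (match_pos : Int) : Bool :=
  let text_before := PySem.Str.slice rule_text none (some match_pos)
  let last_do := PySem.Str.rfind text_before "**Do:**"
  let last_dont := PySem.Str.rfind text_before "**Don't:**"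
  let last_wrong := PySem.Str.rfind text_before "*Why wrong:"
  let markers : List (String × Int) :=
    [("do", last_do), ("dont", last_dont), ("wrong", last_wrong)]
  let markers := markers.filter (fun lp => decide (lp.2 ≥ 0))
  match markers with
  | [] => false
  -- Python max(markers, key=pos) keeps the FIRST maximal element: replace only on strictly greater key
  | m :: ms =>
      let closest := ms.foldl (fun best x => if best.2 < x.2 then x else best) m
      closest.1 == "dont" || closest.1 == "wrong"

-- ===== PORT B =====
-- text.startswith(p, i) with 0 ≤ i ≤ len(text) is exactly: p is a prefix of text[i:]
def is_in_dont_section_alt (rule_text : String) (match_pos : Int) : Bool :=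
  let text := (PySem.Str.slice rule_text none (some match_pos)).toList
  (List.range text.length).foldl
    (fun inside i =>
      if PySem.Chars.startswith (text.drop i) "**Don't:**".toList
         || PySem.Chars.startswith (text.drop i) "*Why wrong:".toList then true
      else if PySem.Chars.startswith (text.drop i) "**Do:**".toList then false
      else inside) false

-- ===== PRECONDITION & SPEC =====
def Spec_is_in_dont_section (rule_text : String) (match_pos : Int) (out : Bool) : Prop := out = is_in_dont_section_alt rule_text match_pos
instance (rule_text : String) (match_pos : Int) (out : Bool) : Decidable (Spec_is_in_dont_section rule_text match_pos out) := by unfold Spec_is_in_dont_section; infer_instance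

-- ===== CLAIM (what is proved, stated in full; the proofs are below) =====
def Claim_equal_is_in_dont_section : Prop := ∀ (rule_text : String) (match_pos : Int), Dom_is_in_dont_section rule_text match_pos → Spec_is_in_dont_section rule_text match_pos (is_in_dont_section rule_text match_pos)

-- ===== LEMMAS AND PROOFS =====

-- A's tail computation as a pure function of the three rfind results
def pvAns (d t w : Int) : Bool :=
  match [(("do" : String), d), ("dont", t), ("wrong", w)].filter (fun lp => decide (lp.2 ≥ 0)) with
  | [] => false
  | m :: ms =>
      let closest := ms.foldl (fun best x => if best.2 < x.2 then x else best) m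
      closest.1 == "dont" || closest.1 == "wrong"

-- B's loop body as a named step function
def pvStep (cs : List Char) (b : Bool) (i : Nat) : Bool :=
  if PySem.Chars.startswith (cs.drop i) "**Don't:**".toList
     || PySem.Chars.startswith (cs.drop i) "*Why wrong:".toList then true
  else if PySem.Chars.startswith (cs.drop i) "**Do:**".toList then false
  else b

lemma pvAns_none {d t w : Int} (hd : d < 0) (ht : t < 0) (hw : w < 0) : pvAns d t w = false := by
  simp [pvAns, List.filter, not_le.mpr hd, not_le.mpr ht, not_le.mpr hw]

lemma pvAns_dont {d t w : Int} (h1 : 0 ≤ t) (h2 : d < t) (h3 : w < t) : pvAns d t w = true := by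
  by_cases hd : d ≥ 0 <;> by_cases hw : w ≥ 0 <;>
    simp [pvAns, List.filter, List.foldl, hd, hw, h1, h2, not_lt.mpr (le_of_lt h3)]

lemma pvAns_wrong {d t w : Int} (h1 : 0 ≤ w) (h2 : d < w) (h3 : t < w) : pvAns d t w = true := by
  by_cases hd : d ≥ 0 <;> by_cases ht : t ≥ 0 <;>
    simp [pvAns, List.filter, List.foldl, hd, ht, h1, h2, h3] <;>
    split_ifs <;> simp_all

lemma pvAns_do {d t w : Int} (h1 : 0 ≤ d) (h2 : t < d) (h3 : w < d) : pvAns d t w = false := by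
  by_cases ht : t ≥ 0 <;> by_cases hw : w ≥ 0 <;>
    simp [pvAns, List.filter, List.foldl, ht, hw, h1, not_lt.mpr (le_of_lt h2), not_lt.mpr (le_of_lt h3)]

lemma pvGo_zero (cs sub : List Char) :
    PySem.Chars.rfind.go cs sub 0 = if sub.isPrefixOf cs then 0 else -1 := by
  simp [PySem.Chars.rfind.go]

lemma pvGo_succ (cs sub : List Char) (k : Nat) :
    PySem.Chars.rfind.go cs sub (k+1)
      = if sub.isPrefixOf (cs.drop (k+1)) then ((k:Int)+1) else PySem.Chars.rfind.go cs sub k := by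
  rw [PySem.Chars.rfind.go]; push_cast; ring_nf

lemma pvGo_le (cs sub : List Char) : ∀ k : Nat, PySem.Chars.rfind.go cs sub k ≤ (k : Int) := by
  intro k
  induction k with
  | zero => rw [pvGo_zero]; split <;> omega
  | succ j ih => rw [pvGo_succ]; split <;> [push_cast; skip] <;> omega

-- two incomparable lists are never both prefixes of the same list
lemma pvExcl {p q l : List Char} (hpq : ¬ (p <+: q)) (hqp : ¬ (q <+: p))
    (h1 : p.isPrefixOf l = true) (h2 : q.isPrefixOf l = true) : False := by
  rcases List.prefix_or_prefix_of_prefix (List.isPrefixOf_iff_prefix.mp h1)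
      (List.isPrefixOf_iff_prefix.mp h2) with h | h
  · exact hpq h
  · exact hqp h

lemma pvMain (cs : List Char) : ∀ k : Nat,
    pvAns (PySem.Chars.rfind.go cs "**Do:**".toList k)
          (PySem.Chars.rfind.go cs "**Don't:**".toList k)
          (PySem.Chars.rfind.go cs "*Why wrong:".toList k)
      = (List.range (k+1)).foldl (pvStep cs) false := by
  intro k
  induction k with
  | zero =>
      rw [pvGo_zero, pvGo_zero, pvGo_zero, List.range_one, List.foldl_cons, List.foldl_nil]
      unfold pvStep PySem.Chars.startswith
      rw [List.drop_zero]
      by_cases hT : ("**Don't:**".toList).isPrefixOf cs = true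
      · have hD : ("**Do:**".toList).isPrefixOf cs = false :=
          Bool.eq_false_iff.mpr (fun h => pvExcl (by decide) (by decide) hT h)
        have hW : ("*Why wrong:".toList).isPrefixOf cs = false :=
          Bool.eq_false_iff.mpr (fun h => pvExcl (by decide) (by decide) hT h)
        rw [hT, hD, hW]; simp only [Bool.true_or, Bool.false_or]
        norm_num [pvAns_dont]
      · rw [Bool.not_eq_true] at hT
        by_cases hW : ("*Why wrong:".toList).isPrefixOf cs = true
        · have hD : ("**Do:**".toList).isPrefixOf cs = false :=
            Bool.eq_false_iff.mpr (fun h => pvExcl (by decide) (by decide) hW h)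
          rw [hT, hD, hW]; simp only [Bool.false_or]
          norm_num [pvAns_wrong]
        · rw [Bool.not_eq_true] at hW
          by_cases hD : ("**Do:**".toList).isPrefixOf cs = true
          · rw [hT, hD, hW]; simp only [Bool.or_self]
            norm_num [pvAns_do]
          · rw [Bool.not_eq_true] at hD
            rw [hT, hD, hW]; simp only [Bool.or_self]
            norm_num [pvAns_none]
  | succ j ih =>
      rw [List.range_succ (n := j + 1), List.foldl_append, List.foldl_cons, List.foldl_nil, ← ih]
      rw [pvGo_succ, pvGo_succ, pvGo_succ]
      unfold pvStep PySem.Chars.startswith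
      have h1 := pvGo_le cs "**Do:**".toList j
      have h2 := pvGo_le cs "**Don't:**".toList j
      have h3 := pvGo_le cs "*Why wrong:".toList j
      by_cases hT : ("**Don't:**".toList).isPrefixOf (cs.drop (j+1)) = true
      · have hD : ("**Do:**".toList).isPrefixOf (cs.drop (j+1)) = false :=
          Bool.eq_false_iff.mpr (fun h => pvExcl (by decide) (by decide) hT h)
        have hW : ("*Why wrong:".toList).isPrefixOf (cs.drop (j+1)) = false :=
          Bool.eq_false_iff.mpr (fun h => pvExcl (by decide) (by decide) hT h)
        rw [hT, hD, hW]; norm_num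
        exact pvAns_dont (by omega) (by omega) (by omega)
      · rw [Bool.not_eq_true] at hT
        by_cases hW : ("*Why wrong:".toList).isPrefixOf (cs.drop (j+1)) = true
        · have hD : ("**Do:**".toList).isPrefixOf (cs.drop (j+1)) = false :=
            Bool.eq_false_iff.mpr (fun h => pvExcl (by decide) (by decide) hW h)
          rw [hT, hD, hW]; norm_num
          exact pvAns_wrong (by omega) (by omega) (by omega)
        · rw [Bool.not_eq_true] at hW
          by_cases hD : ("**Do:**".toList).isPrefixOf (cs.drop (j+1)) = true
          · rw [hT, hD, hW]; norm_num
            exact pvAns_do (by omega) (by omega) (by omega)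
          · rw [Bool.not_eq_true] at hD
            rw [hT, hD, hW]; norm_num

-- the extra step at index len(cs) is a no-op: nonempty pattern is never a prefix of []
lemma pvTrim (cs : List Char) :
    (List.range (cs.length + 1)).foldl (pvStep cs) false
      = (List.range cs.length).foldl (pvStep cs) false := by
  rw [List.range_succ, List.foldl_append, List.foldl_cons, List.foldl_nil]
  simp [pvStep, PySem.Chars.startswith, List.drop_length]

-- ===== VERDICT (by name: the statement is the Claim_ definition above) =====
theorem is_in_dont_section_spec : Claim_equal_is_in_dont_section := by
  intro rule_text match_pos _
  unfold Spec_is_in_dont_section is_in_dont_section is_in_dont_section_alt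
  simp only [PySem.Str.rfind, PySem.Chars.rfind]
  set cs := (PySem.Str.slice rule_text none (some match_pos)).toList with hcs
  show pvAns _ _ _ = _
  rw [pvMain cs cs.length, pvTrim cs]
  rfl
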